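-- pv_equiv track=rewrite | github.com/Jsounduk/jaicat_project | lib/nlp/medical.py | classify_symptoms
-- ===== SOURCE A (Python) =====
-- def classify_symptoms(symptoms):
--     """
--     Classify the input symptoms into categories.
--
--     Parameters:
--     - symptoms: A list of symptom strings to classify.
--
--     Returns:
--     - A dictionary categorizing symptoms.
--     """
--     symptom_categories = {
--         "Respiratory": [],
--         "Gastrointestinal": [],
--         "Neurological": [],
--         "Cardiovascular": [],
--         "Others": []
--     }
--
--     for symptom in symptoms:
--         # Simple keyword matching for classification (this could be replaced with a more sophisticated model)
--         if "cough" in symptom or "breath" in symptom: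
--             symptom_categories["Respiratory"].append(symptom)
--         elif "nausea" in symptom or "vomit" in symptom:
--             symptom_categories["Gastrointestinal"].append(symptom)
--         elif "headache" in symptom:
--             symptom_categories["Neurological"].append(symptom)
--         elif "chest pain" in symptom:
--             symptom_categories["Cardiovascular"].append(symptom)
--         else:
--             symptom_categories["Others"].append(symptom)
--
--     return symptom_categories
-- ===== SOURCE B (Python) =====
-- RULES = [
--     ("Respiratory", ("cough", "breath")),
--     ("Gastrointestinal", ("nausea", "vomit")),
--     ("Neurological", ("headache",)),
--     ("Cardiovascular", ("chest pain",)),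
-- ]
--
-- CATEGORIES = ["Respiratory", "Gastrointestinal", "Neurological", "Cardiovascular", "Others"]
--
-- def _category(symptom):
--     for cat, keywords in RULES:
--         if any(k in symptom for k in keywords):
--             return cat
--     return "Others"
--
-- def classify_symptoms(symptoms):
--     return {c: [s for s in symptoms if _category(s) == c] for c in CATEGORIES}
-- ===== Notes on version B (the rewrite author's own statement) =====
-- stated objective: idiomatic
-- what changed: Replaces the single mutating loop with hard-coded elif branches by a data-driven (category, keywords) rule table plus a per-category filter built as a dict comprehension (five filtering passes instead of one appending pass).
import Mathlib
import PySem

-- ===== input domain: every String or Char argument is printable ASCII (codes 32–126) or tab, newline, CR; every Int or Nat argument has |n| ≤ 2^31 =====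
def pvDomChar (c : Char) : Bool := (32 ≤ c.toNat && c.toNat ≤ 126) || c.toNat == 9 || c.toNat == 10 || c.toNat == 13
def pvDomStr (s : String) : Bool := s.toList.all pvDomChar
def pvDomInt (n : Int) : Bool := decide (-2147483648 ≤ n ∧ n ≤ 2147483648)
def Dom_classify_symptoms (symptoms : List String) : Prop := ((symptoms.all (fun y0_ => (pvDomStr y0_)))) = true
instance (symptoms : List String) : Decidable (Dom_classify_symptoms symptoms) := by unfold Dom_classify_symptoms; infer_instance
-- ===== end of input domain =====

-- B replaces A's hard-coded elif loop by a data-driven rule table with a per-category filter (idiomatic; same O(n) cost).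


-- ===== PORT A =====
-- the loop body of A: first-match elif chain appending to the matching category's list
def pvStepA (d : PySem.Dict String (List String)) (symptom : String) : PySem.Dict String (List String) :=
  if PySem.Str.isIn "cough" symptom || PySem.Str.isIn "breath" symptom then
    d.modify "Respiratory" [] (fun l => l ++ [symptom])
  else if PySem.Str.isIn "nausea" symptom || PySem.Str.isIn "vomit" symptom then
    d.modify "Gastrointestinal" [] (fun l => l ++ [symptom])
  else if PySem.Str.isIn "headache" symptom then
    d.modify "Neurological" [] (fun l => l ++ [symptom])
  else if PySem.Str.isIn "chest pain" symptom then
    d.modify "Cardiovascular" [] (fun l => l ++ [symptom])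
  else
    d.modify "Others" [] (fun l => l ++ [symptom])

def classify_symptoms (symptoms : List String) : List (String × List String) :=
  (symptoms.foldl pvStepA
    (PySem.Dict.mk [("Respiratory", []), ("Gastrointestinal", []), ("Neurological", []),
     ("Cardiovascular", []), ("Others", [])])).items

-- ===== PORT B =====
def pvRules : List (String × List String) :=
  [("Respiratory", ["cough", "breath"]),
   ("Gastrointestinal", ["nausea", "vomit"]),
   ("Neurological", ["headache"]),
   ("Cardiovascular", ["chest pain"])]

-- B's _category: first rule whose keyword list has a hit, else "Others"
def pvCategory (symptom : String) : String :=
  match pvRules.find? (fun r => r.2.any (fun k => PySem.Str.isIn k symptom)) with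
  | some r => r.1
  | none => "Others"

def pvCategories : List String :=
  ["Respiratory", "Gastrointestinal", "Neurological", "Cardiovascular", "Others"]

def classify_symptoms_alt (symptoms : List String) : List (String × List String) :=
  pvCategories.map (fun c => (c, symptoms.filter (fun s => pvCategory s == c)))

-- ===== PRECONDITION & SPEC =====
def Spec_classify_symptoms (symptoms : List String) (out : List (String × List String)) : Prop := out = classify_symptoms_alt symptoms
instance (symptoms : List String) (out : List (String × List String)) : Decidable (Spec_classify_symptoms symptoms out) := by unfold Spec_classify_symptoms; infer_instance

-- ===== CLAIM (what is proved, stated in full; the proofs are below) =====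
def Claim_equal_classify_symptoms : Prop := ∀ (symptoms : List String), Dom_classify_symptoms symptoms → Spec_classify_symptoms symptoms (classify_symptoms symptoms)

-- ===== LEMMAS AND PROOFS =====

theorem pvCategory_eq (s : String) :
    pvCategory s =
      if PySem.Str.isIn "cough" s || PySem.Str.isIn "breath" s then "Respiratory"
      else if PySem.Str.isIn "nausea" s || PySem.Str.isIn "vomit" s then "Gastrointestinal"
      else if PySem.Str.isIn "headache" s then "Neurological"
      else if PySem.Str.isIn "chest pain" s then "Cardiovascular"
      else "Others" := by
  simp only [pvCategory, pvRules, List.find?, List.any]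
  split_ifs with h1 h2 h3 h4
  · rw [Bool.or_eq_true] at h1
    rcases h1 with h | h <;> simp_all
  · rw [Bool.or_eq_true, not_or, Bool.not_eq_true, Bool.not_eq_true] at h1
    rw [Bool.or_eq_true] at h2
    rcases h2 with h | h <;> simp_all
  all_goals
    rw [Bool.or_eq_true, not_or, Bool.not_eq_true, Bool.not_eq_true] at h1 h2
    simp_all [Bool.not_eq_true]

set_option maxHeartbeats 2000000 in
theorem pvFold_invariant (symptoms : List String) :
    ∀ rs gs ns cs os : List String,
      (symptoms.foldl pvStepA
        (PySem.Dict.mk [("Respiratory", rs), ("Gastrointestinal", gs), ("Neurological", ns),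
         ("Cardiovascular", cs), ("Others", os)])).items =
      [("Respiratory", rs ++ symptoms.filter (fun s => pvCategory s == "Respiratory")),
       ("Gastrointestinal", gs ++ symptoms.filter (fun s => pvCategory s == "Gastrointestinal")),
       ("Neurological", ns ++ symptoms.filter (fun s => pvCategory s == "Neurological")),
       ("Cardiovascular", cs ++ symptoms.filter (fun s => pvCategory s == "Cardiovascular")),
       ("Others", os ++ symptoms.filter (fun s => pvCategory s == "Others"))] := by
  induction symptoms with
  | nil => intro rs gs ns cs os; simp
  | cons s rest ih =>
    intro rs gs ns cs os
    have hstep : pvStepA (PySem.Dict.mk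
        [("Respiratory", rs), ("Gastrointestinal", gs), ("Neurological", ns),
         ("Cardiovascular", cs), ("Others", os)]) s =
      PySem.Dict.mk
        [("Respiratory", if pvCategory s = "Respiratory" then rs ++ [s] else rs),
         ("Gastrointestinal", if pvCategory s = "Gastrointestinal" then gs ++ [s] else gs),
         ("Neurological", if pvCategory s = "Neurological" then ns ++ [s] else ns),
         ("Cardiovascular", if pvCategory s = "Cardiovascular" then cs ++ [s] else cs),
         ("Others", if pvCategory s = "Others" then os ++ [s] else os)] := by
      unfold pvStepA
      rw [pvCategory_eq]
      split_ifs with h1 h2 h3 h4 <;>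
        simp_all [PySem.Dict.modify, PySem.Dict.insert, PySem.Dict.getD, PySem.Dict.get?,
          PySem.Dict.contains]
    rw [List.foldl_cons, hstep, ih]
    simp only [List.filter_cons, beq_iff_eq]
    split_ifs <;> simp_all [List.append_assoc]

-- ===== VERDICT (by name: the statement is the Claim_ definition above) =====
theorem classify_symptoms_spec : Claim_equal_classify_symptoms := by
  intro symptoms _
  unfold Spec_classify_symptoms classify_symptoms classify_symptoms_alt pvCategories
  simp [pvFold_invariant]
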